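-- pv_equiv track=rewrite | github.com/girumel/competitive-programming | A2SV Remote G5 Education Contest #28 20-Aug-2024/D - Rudolf and k Bridges 198121.py | calc
-- ===== SOURCE A (Python) =====
-- from collections import deque
--
-- def calc(depths, m, d):
--     queue = deque([(0, 1)]) # (index, cost)
--     for i in range(1, m):
--         while queue and i - queue[0][0] - 1 > d:
--             queue.popleft()
--         cost = queue[0][1] + depths[i] + 1
--         while queue and queue[-1][1] >= cost:
--             queue.pop()
--         queue.append((i, cost))
--     return queue[-1][1]
-- ===== SOURCE B (Python) =====
-- def calc(depths, m, d):
--     dp = [1]  # dp[0] = 1; dp[i] = cost of a bridge ending at column i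
--     for i in range(1, m):
--         lo = i - d - 1
--         if lo < 0:
--             lo = 0
--         best = dp[lo]
--         for j in range(lo + 1, i):
--             if dp[j] < best:
--                 best = dp[j]
--         dp.append(best + depths[i] + 1)
--     return dp[-1]
-- ===== Notes on version B (the rewrite author's own statement) =====
-- stated objective: simpler
-- what changed: Replaces A's monotonic deque (eager domination pops + lazy front expiry) by a plain DP list with a direct rescan of the length-(d+1) window minimum for each column; no deque, no pair bookkeeping.
import Mathlib
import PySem

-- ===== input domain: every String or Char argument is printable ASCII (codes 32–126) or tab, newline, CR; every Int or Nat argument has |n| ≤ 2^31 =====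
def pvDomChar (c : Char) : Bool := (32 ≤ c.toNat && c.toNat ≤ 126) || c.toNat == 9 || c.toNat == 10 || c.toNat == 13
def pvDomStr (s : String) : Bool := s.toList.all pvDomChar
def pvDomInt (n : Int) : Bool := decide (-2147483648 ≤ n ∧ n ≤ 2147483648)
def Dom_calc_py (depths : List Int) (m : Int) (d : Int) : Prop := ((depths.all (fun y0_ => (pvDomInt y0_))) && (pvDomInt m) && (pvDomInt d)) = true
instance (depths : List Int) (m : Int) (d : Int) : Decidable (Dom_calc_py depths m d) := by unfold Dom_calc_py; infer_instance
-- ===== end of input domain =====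

-- B replaces A's monotonic deque by a dp list with a direct rescan of each window minimum
-- (simpler bookkeeping, not faster). Equivalence of the return values is proved below.

-- ===== PORT A =====
-- one body of A's `for i in range(1, m)` loop: front expiry, cost, back domination pops, append
def calcA_step (depths : List Int) (d : Int) (queue : List (Int × Int)) (i : Int) : List (Int × Int) :=
  let q1 := queue.dropWhile (fun p => decide (d < i - p.1 - 1))   -- while queue and i - queue[0][0] - 1 > d: popleft
  let front := match q1 with
    | [] => 0                      -- Python raises IndexError here; such inputs are outside Pre_
    | p :: _ => p.2                -- queue[0][1]
  let cost := front + PySem.List.pyGetD depths i 0 + 1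
  let q2 := (q1.reverse.dropWhile (fun p => decide (cost ≤ p.2))).reverse   -- while queue and queue[-1][1] >= cost: pop
  q2 ++ [(i, cost)]

def calc_py (depths : List Int) (m : Int) (d : Int) : Int :=
  let queue := (PySem.List.pyRange 1 m 1).foldl (calcA_step depths d) [((0 : Int), (1 : Int))]
  ((PySem.List.pyGet? queue (-1)).getD (0, 0)).2   -- queue[-1][1]; queue is never empty

-- ===== PORT B =====
-- inner loop `for j in range(lo + 1, i): if dp[j] < best: best = dp[j]`
def calcB_min (dp : List Int) (b0 : Int) (js : List Int) : Int :=
  js.foldl (fun b j => if PySem.List.pyGetD dp j 0 < b then PySem.List.pyGetD dp j 0 else b) b0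

-- one body of B's `for i in range(1, m)` loop
def calcB_step (depths : List Int) (d : Int) (dp : List Int) (i : Int) : List Int :=
  let lo := if i - d - 1 < 0 then 0 else i - d - 1
  let best := calcB_min dp (PySem.List.pyGetD dp lo 0) (PySem.List.pyRange (lo + 1) i 1)
  dp ++ [best + PySem.List.pyGetD depths i 0 + 1]

def calc_py_alt (depths : List Int) (m : Int) (d : Int) : Int :=
  let dp := (PySem.List.pyRange 1 m 1).foldl (calcB_step depths d) [(1 : Int)]
  (PySem.List.pyGet? dp (-1)).getD 0   -- dp[-1]

-- ===== PRECONDITION & SPEC =====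
-- Pre_ excludes exactly the inputs where A raises IndexError: with m ≥ 2, a negative d empties the
-- deque before queue[0] is read, and m > len(depths) makes depths[i] go out of range.
def Pre_calc_py (depths : List Int) (m : Int) (d : Int) : Prop :=
  m ≤ 1 ∨ (m ≤ (depths.length : Int) ∧ 0 ≤ d)
instance (depths : List Int) (m : Int) (d : Int) : Decidable (Pre_calc_py depths m d) := by
  unfold Pre_calc_py; infer_instance

def pvWitness_calc_py : List Int × Int × Int := ([0, 1, 2, 3, 4, 5], 6, 2)

def Spec_calc_py (depths : List Int) (m : Int) (d : Int) (out : Int) : Prop := out = calc_py_alt depths m d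
instance (depths : List Int) (m : Int) (d : Int) (out : Int) : Decidable (Spec_calc_py depths m d out) := by unfold Spec_calc_py; infer_instance

-- ===== CLAIM (what is proved, stated in full; the proofs are below) =====
def Claim_equal_calc_py : Prop := ∀ (depths : List Int) (m : Int) (d : Int), Dom_calc_py depths m d → Pre_calc_py depths m d → Spec_calc_py depths m d (calc_py depths m d)

-- ===== LEMMAS AND PROOFS =====

-- `pyGetD` at a nonnegative Int index is `getD` at the corresponding Nat index
theorem pyGetD_toNat (dp : List Int) (i : Int) (h : 0 ≤ i) :
    PySem.List.pyGetD dp i 0 = dp.getD i.toNat 0 := by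
  simp [PySem.List.pyGetD, PySem.List.pyGet?_of_nonneg dp h, List.getD_eq_getElem?_getD]

-- an element failing the predicate survives dropWhile
theorem mem_dropWhile_of_mem {α : Type} (p : α → Bool) (l : List α) (x : α)
    (hx : x ∈ l) (hp : p x = false) : x ∈ l.dropWhile p := by
  have := List.takeWhile_append_dropWhile (p := p) (l := l)
  rw [← this] at hx
  rcases List.mem_append.1 hx with h | h
  · exact absurd (List.mem_takeWhile_imp h) (by simp [hp])
  · exact h

-- the loop invariant tying A's deque `q` to B's dp list after the steps i = 1 .. n have run
def pvInv (d : Int) (n : Nat) (q : List (Int × Int)) (dp : List Int) : Prop :=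
  dp.length = n + 1 ∧
  q ≠ [] ∧
  q.getLast? = some ((n : Int), dp.getD n 0) ∧
  (∀ p ∈ q, ∃ j : Nat, p.1 = (j : Int) ∧ j ≤ n ∧ (n : Int) - d - 1 ≤ (j : Int) ∧ p.2 = dp.getD j 0) ∧
  q.Pairwise (fun p p' => p.1 < p'.1 ∧ p.2 < p'.2) ∧
  (∀ k : Nat, (n : Int) - d - 1 ≤ (k : Int) → k ≤ n → ∃ p ∈ q, (k : Int) ≤ p.1 ∧ p.2 ≤ dp.getD k 0)

theorem pvInv_zero (d : Int) (hd : 0 ≤ d) : pvInv d 0 [((0 : Int), (1 : Int))] [(1 : Int)] := by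
  refine ⟨rfl, by simp, by simp, ?_, by simp, ?_⟩
  · rintro p hp
    simp only [List.mem_singleton] at hp
    subst hp
    exact ⟨0, by simp, by simp, by omega, by simp⟩
  · intro k _ hk
    interval_cases k
    exact ⟨(0, 1), by simp⟩

-- B's inner rescan computes the minimum of dp over [a, c): it is ≤ every window value and attained
theorem calcB_min_spec (dp : List Int) (js : List Int) : ∀ b0 : Int,
    (calcB_min dp b0 js ≤ b0 ∧ ∀ j ∈ js, calcB_min dp b0 js ≤ PySem.List.pyGetD dp j 0) ∧
    (calcB_min dp b0 js = b0 ∨ ∃ j ∈ js, calcB_min dp b0 js = PySem.List.pyGetD dp j 0) := by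
  induction js with
  | nil => intro b0; simp [calcB_min]
  | cons j js ih =>
    intro b0
    by_cases hc : PySem.List.pyGetD dp j 0 < b0
    · obtain ⟨⟨hle, hall⟩, hat⟩ := ih (PySem.List.pyGetD dp j 0)
      have hstep : calcB_min dp b0 (j :: js) = calcB_min dp (PySem.List.pyGetD dp j 0) js := by
        simp [calcB_min, List.foldl_cons, if_pos hc]
      rw [hstep]
      refine ⟨⟨by omega, ?_⟩, ?_⟩
      · intro x hx
        rcases List.mem_cons.1 hx with rfl | hx
        · omega
        · exact hall x hx
      · rcases hat with hat | ⟨x, hx, hxx⟩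
        · exact Or.inr ⟨j, List.mem_cons_self, hat⟩
        · exact Or.inr ⟨x, List.mem_cons_of_mem _ hx, hxx⟩
    · obtain ⟨⟨hle, hall⟩, hat⟩ := ih b0
      have hstep : calcB_min dp b0 (j :: js) = calcB_min dp b0 js := by
        simp [calcB_min, List.foldl_cons, if_neg hc]
      rw [hstep]
      refine ⟨⟨hle, ?_⟩, ?_⟩
      · intro x hx
        rcases List.mem_cons.1 hx with rfl | hx
        · omega
        · exact hall x hx
      · rcases hat with hat | ⟨x, hx, hxx⟩
        · exact Or.inl hat
        · exact Or.inr ⟨x, List.mem_cons_of_mem _ hx, hxx⟩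

theorem calcB_min_le (dp : List Int) (b0 : Int) (a c : Int) :
    calcB_min dp b0 (PySem.List.pyRange a c 1) ≤ b0 ∧
    (∀ j, a ≤ j → j < c → calcB_min dp b0 (PySem.List.pyRange a c 1) ≤ PySem.List.pyGetD dp j 0) := by
  obtain ⟨⟨h1, h2⟩, _⟩ := calcB_min_spec dp (PySem.List.pyRange a c 1) b0
  exact ⟨h1, fun j hj1 hj2 => h2 j (PySem.List.mem_pyRange_one.2 ⟨hj1, hj2⟩)⟩

theorem calcB_min_attained (dp : List Int) (b0 : Int) (a c : Int) :
    calcB_min dp b0 (PySem.List.pyRange a c 1) = b0 ∨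
    ∃ j, a ≤ j ∧ j < c ∧ calcB_min dp b0 (PySem.List.pyRange a c 1) = PySem.List.pyGetD dp j 0 := by
  obtain ⟨_, hat⟩ := calcB_min_spec dp (PySem.List.pyRange a c 1) b0
  rcases hat with h | ⟨j, hj, hjj⟩
  · exact Or.inl h
  · obtain ⟨h1, h2⟩ := PySem.List.mem_pyRange_one.1 hj
    exact Or.inr ⟨j, h1, h2, hjj⟩

-- the head of a dropWhile result fails the predicate
theorem dropWhile_cons_head_false {α : Type} (p : α → Bool) (l : List α) (x : α) (t : List α)
    (h : l.dropWhile p = x :: t) : p x = false := by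
  induction l with
  | nil => simp at h
  | cons a l ih =>
    by_cases hpa : p a
    · rw [List.dropWhile_cons_of_pos hpa] at h
      exact ih h
    · rw [List.dropWhile_cons_of_neg hpa] at h
      injection h with h1 _
      subst h1
      simpa using hpa

-- an element dropped by dropWhile satisfied the predicate
theorem pred_of_not_mem_dropWhile {α : Type} (p : α → Bool) (l : List α) (x : α)
    (hx : x ∈ l) (hnd : x ∉ l.dropWhile p) : p x = true := by
  by_contra h
  exact hnd (mem_dropWhile_of_mem p l x hx (by simpa using h))

-- calcA_step, rewritten once the surviving front of the deque is exposed
theorem calcA_step_eq (depths : List Int) (d : Int) (q : List (Int × Int)) (i : Int)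
    (ph : Int × Int) (qrest : List (Int × Int))
    (hq : q.dropWhile (fun p => decide (d < i - p.1 - 1)) = ph :: qrest) :
    calcA_step depths d q i =
      ((ph :: qrest).reverse.dropWhile
          (fun p => decide (ph.2 + PySem.List.pyGetD depths i 0 + 1 ≤ p.2))).reverse
        ++ [(i, ph.2 + PySem.List.pyGetD depths i 0 + 1)] := by
  simp only [calcA_step, hq]

-- one loop iteration preserves the invariant
theorem pvInv_step (depths : List Int) (d : Int) (hd : 0 ≤ d) (n : Nat)
    (q : List (Int × Int)) (dp : List Int) (h : pvInv d n q dp) :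
    pvInv d (n + 1) (calcA_step depths d q ((n : Int) + 1)) (calcB_step depths d dp ((n : Int) + 1)) := by
  obtain ⟨hlen, hne, hlast, hmem, hpw, hcov⟩ := h
  have hlastmem : ((n : Int), dp.getD n 0) ∈ q := List.mem_of_getLast? hlast
  set i : Int := (n : Int) + 1 with hi
  set q1 := q.dropWhile (fun p => decide (d < i - p.1 - 1)) with hq1def
  have hq1ne : q1 ≠ [] := by
    intro h0
    have := List.dropWhile_eq_nil_iff.1 h0 _ hlastmem
    simp only [decide_eq_true_eq] at this
    omega
  have hq1sub : List.Sublist q1 q := List.dropWhile_sublist _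
  have hpw1 : q1.Pairwise (fun p p' => p.1 < p'.1 ∧ p.2 < p'.2) := hpw.sublist hq1sub
  obtain ⟨ph, qrest, hq1eq⟩ := List.exists_cons_of_ne_nil hq1ne
  have hphmemq1 : ph ∈ q1 := hq1eq ▸ List.mem_cons_self
  have hphfail : (decide (d < i - ph.1 - 1)) = false :=
    dropWhile_cons_head_false _ q ph qrest (hq1def ▸ hq1eq)
  have hphlb : i - ph.1 - 1 ≤ d := by simpa using hphfail
  have hq1lb : ∀ p ∈ q1, i - d - 1 ≤ p.1 := by
    intro p hp
    rw [hq1eq] at hp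
    rcases List.mem_cons.1 hp with rfl | hp
    · omega
    · have := ((List.pairwise_cons.1 (hq1eq ▸ hpw1)).1 p hp).1
      omega
  -- B's window bounds
  set lo := (if i - d - 1 < 0 then (0 : Int) else i - d - 1) with hlo
  have hlo_nonneg : 0 ≤ lo := by rw [hlo]; split <;> omega
  have hlo_ge : i - d - 1 ≤ lo := by rw [hlo]; split <;> omega
  have hlo_le_n : lo ≤ (n : Int) := by rw [hlo]; split <;> omega
  set loN := lo.toNat with hloN
  have hloN_cast : (loN : Int) = lo := Int.toNat_of_nonneg hlo_nonneg
  have hloN_le : loN ≤ n := by omega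
  set best := calcB_min dp (PySem.List.pyGetD dp lo 0) (PySem.List.pyRange (lo + 1) i 1) with hbest
  have hb0 : PySem.List.pyGetD dp lo 0 = dp.getD loN 0 := pyGetD_toNat dp lo hlo_nonneg
  have hbest_le : ∀ k : Nat, loN ≤ k → k ≤ n → best ≤ dp.getD k 0 := by
    intro k h1 h2
    rcases Nat.eq_or_lt_of_le h1 with rfl | hlt
    · rw [← hb0]
      exact (calcB_min_le dp _ (lo + 1) i).1
    · have := (calcB_min_le dp (PySem.List.pyGetD dp lo 0) (lo + 1) i).2 (k : Int)
        (by omega) (by omega)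
      rwa [PySem.List.pyGetD_natCast] at this
  have hbest_at : ∃ k0 : Nat, loN ≤ k0 ∧ k0 ≤ n ∧ best = dp.getD k0 0 := by
    rcases calcB_min_attained dp (PySem.List.pyGetD dp lo 0) (lo + 1) i with hh | ⟨j, hj1, hj2, hj3⟩
    · exact ⟨loN, le_refl _, hloN_le, by rw [← hb0]; exact hh⟩
    · refine ⟨j.toNat, by omega, by omega, ?_⟩
      have hjc : ((j.toNat : Nat) : Int) = j := Int.toNat_of_nonneg (by omega)
      have hbj : best = PySem.List.pyGetD dp ((j.toNat : Nat) : Int) 0 := by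
        rw [hjc]; exact hbest.trans hj3
      rw [hbj, PySem.List.pyGetD_natCast]
  -- the deque front equals B's window minimum
  obtain ⟨j0, hj0eq, hj0le, hj0thr, hj0val⟩ := hmem ph (hq1sub.subset hphmemq1)
  have hj0ge : loN ≤ j0 := by
    have : lo ≤ (j0 : Int) := by
      rw [hlo]; split <;> [omega; (have := hq1lb ph hphmemq1; omega)]
    omega
  have hfront_ge : best ≤ ph.2 := by rw [hj0val]; exact hbest_le j0 hj0ge hj0le
  have hfront_le : ph.2 ≤ best := by
    obtain ⟨k0, hk01, hk02, hk03⟩ := hbest_at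
    have hk0lb : (n : Int) - d - 1 ≤ (k0 : Int) := by omega
    obtain ⟨p, hpq, hpk, hpv⟩ := hcov k0 hk0lb hk02
    have hpq1 : p ∈ q1 := by
      refine mem_dropWhile_of_mem _ q p hpq ?_
      simp only [decide_eq_false_iff_not, not_lt]
      omega
    have hple : ph.2 ≤ p.2 := by
      rw [hq1eq] at hpq1
      rcases List.mem_cons.1 hpq1 with rfl | hp
      · exact le_refl _
      · exact le_of_lt ((List.pairwise_cons.1 (hq1eq ▸ hpw1)).1 p hp).2
    calc ph.2 ≤ p.2 := hple
      _ ≤ dp.getD k0 0 := hpv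
      _ = best := hk03.symm
  have hfront : ph.2 = best := le_antisymm hfront_le hfront_ge
  -- rewrite both steps
  set gdep := PySem.List.pyGetD depths i 0 with hg
  set cost := best + gdep + 1 with hcost
  have hA : calcA_step depths d q i =
      ((ph :: qrest).reverse.dropWhile (fun p => decide (cost ≤ p.2))).reverse ++ [(i, cost)] := by
    rw [calcA_step_eq depths d q i ph qrest (hq1def ▸ hq1eq), ← hg, hfront, ← hcost]
  have hB : calcB_step depths d dp i = dp ++ [cost] := by
    simp only [calcB_step]
    rw [← hlo, ← hbest, ← hg, ← hcost]
  rw [hA, hB]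
  set q2 := ((ph :: qrest).reverse.dropWhile (fun p => decide (cost ≤ p.2))).reverse with hq2def
  have hq2sub : List.Sublist q2 (ph :: qrest) := by
    have h1 : List.Sublist ((ph :: qrest).reverse.dropWhile (fun p => decide (cost ≤ p.2))) (ph :: qrest).reverse :=
      List.dropWhile_sublist _
    have h2 := h1.reverse
    rw [List.reverse_reverse] at h2
    exact h2
  have hpw2 : q2.Pairwise (fun p p' => p.1 < p'.1 ∧ p.2 < p'.2) := (hq1eq ▸ hpw1).sublist hq2sub
  have hpwrev : List.Pairwise (fun p p' : Int × Int => p'.1 < p.1 ∧ p'.2 < p.2) (ph :: qrest).reverse :=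
    List.pairwise_reverse.2 (hq1eq ▸ hpw1)
  have hq2lt : ∀ p ∈ q2, p.2 < cost := by
    intro p hp
    rw [hq2def, List.mem_reverse] at hp
    cases hdr : (ph :: qrest).reverse.dropWhile (fun p => decide (cost ≤ p.2)) with
    | nil => rw [hdr] at hp; simp at hp
    | cons dh dt =>
      rw [hdr] at hp
      have hdh : (decide (cost ≤ dh.2)) = false := dropWhile_cons_head_false _ _ dh dt hdr
      have hdh' : dh.2 < cost := by simpa using hdh
      have hpwdr : List.Pairwise (fun p p' : Int × Int => p'.1 < p.1 ∧ p'.2 < p.2) (dh :: dt) := by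
        rw [← hdr]; exact hpwrev.sublist (List.dropWhile_sublist _)
      rcases List.mem_cons.1 hp with rfl | hp
      · exact hdh'
      · have := ((List.pairwise_cons.1 hpwdr).1 p hp).2
        omega
  have hdropped : ∀ p ∈ ph :: qrest, p ∉ q2 → cost ≤ p.2 := by
    intro p hp hnp
    have hp' : p ∈ (ph :: qrest).reverse := List.mem_reverse.2 hp
    have hnp' : p ∉ (ph :: qrest).reverse.dropWhile (fun p => decide (cost ≤ p.2)) := by
      rw [hq2def, List.mem_reverse] at hnp
      exact hnp
    have := pred_of_not_mem_dropWhile _ _ p hp' hnp'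
    simpa using this
  have hgetD_left : ∀ k : Nat, k ≤ n → (dp ++ [cost]).getD k 0 = dp.getD k 0 := by
    intro k hk
    rw [List.getD_eq_getElem?_getD, List.getD_eq_getElem?_getD,
      List.getElem?_append_left (by omega : k < dp.length)]
  have hgetD_new : (dp ++ [cost]).getD (n + 1) 0 = cost := by
    rw [List.getD_eq_getElem?_getD, List.getElem?_append_right (by omega : dp.length ≤ n + 1)]
    simp [hlen]
  refine ⟨by simp [hlen], by simp, ?_, ?_, ?_, ?_⟩
  · rw [List.getLast?_concat, hgetD_new]
    have hcasti : ((n + 1 : Nat) : Int) = i := by rw [hi]; push_cast; ring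
    rw [hcasti]
  · intro p hp
    rcases List.mem_append.1 hp with hp | hp
    · obtain ⟨j, hj1, hj2, hj3, hj4⟩ := hmem p (hq1sub.subset (hq1eq ▸ hq2sub.subset hp))
      have hlbp : i - d - 1 ≤ p.1 := hq1lb p (hq1eq ▸ hq2sub.subset hp)
      refine ⟨j, hj1, by omega, by push_cast; omega, ?_⟩
      rw [hgetD_left j hj2]
      exact hj4
    · simp only [List.mem_singleton] at hp
      subst hp
      refine ⟨n + 1, by push_cast; omega, le_refl _, by push_cast; omega, hgetD_new.symm⟩
  · rw [List.pairwise_append]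
    refine ⟨hpw2, by simp, ?_⟩
    intro p hp x hx
    simp only [List.mem_singleton] at hx
    subst hx
    obtain ⟨j, hj1, hj2, _, _⟩ := hmem p (hq1sub.subset (hq1eq ▸ hq2sub.subset hp))
    exact ⟨by omega, hq2lt p hp⟩
  · intro k hk1 hk2
    by_cases hkn : k = n + 1
    · subst hkn
      refine ⟨(i, cost), List.mem_append.2 (Or.inr (List.mem_singleton.2 rfl)), by push_cast; omega, ?_⟩
      rw [hgetD_new]
    · have hk2' : k ≤ n := by omega
      obtain ⟨p, hpq, hpk, hpv⟩ := hcov k (by push_cast at hk1 ⊢; omega) hk2'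
      by_cases hpq1 : p ∈ q1
      · by_cases hpq2 : p ∈ q2
        · refine ⟨p, List.mem_append.2 (Or.inl hpq2), hpk, ?_⟩
          rw [hgetD_left k hk2']
          exact hpv
        · have hcostp := hdropped p (hq1eq ▸ hpq1) hpq2
          refine ⟨(i, cost), List.mem_append.2 (Or.inr (List.mem_singleton.2 rfl)), by push_cast; omega, ?_⟩
          have hh := hgetD_left k hk2'
          simp only [hh]
          omega
      · exfalso
        have := pred_of_not_mem_dropWhile _ q p hpq (hq1def ▸ hpq1)
        simp only [decide_eq_true_eq] at this
        push_cast at hk1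
        omega

theorem pvInv_fold (depths : List Int) (d : Int) (hd : 0 ≤ d) (n : Nat) :
    pvInv d n (((List.range n).map (fun k : Nat => (1 : Int) + (k : Int))).foldl (calcA_step depths d) [((0 : Int), (1 : Int))])
            (((List.range n).map (fun k : Nat => (1 : Int) + (k : Int))).foldl (calcB_step depths d) [(1 : Int)]) := by
  induction n with
  | zero => exact pvInv_zero d hd
  | succ n ih =>
      rw [List.range_succ, List.map_append, List.foldl_append, List.foldl_append]
      simpa [add_comm] using pvInv_step depths d hd n _ _ ih

-- ===== VERDICT (by name: the statement is the Claim_ definition above) =====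
theorem calc_py_spec : Claim_equal_calc_py := by
  intro depths m d _ hpre
  unfold Spec_calc_py
  by_cases hm : m ≤ 1
  · have hz : (m - 1).toNat = 0 := by omega
    have hr : PySem.List.pyRange 1 m 1 = [] := by
      rw [PySem.List.pyRange_one, hz]
      simp
    unfold calc_py calc_py_alt
    rw [hr]
    rfl
  · have hd : 0 ≤ d := by
      rcases hpre with h | ⟨_, hdd⟩
      · omega
      · exact hdd
    have hr : PySem.List.pyRange 1 m 1
        = (List.range ((m - 1).toNat)).map (fun k : Nat => (1 : Int) + (k : Int)) := by
      rw [PySem.List.pyRange_one]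
    obtain ⟨hlen, hne, hlast, -, -, -⟩ := pvInv_fold depths d hd ((m - 1).toNat)
    simp only [calc_py, calc_py_alt]
    rw [hr]
    rw [PySem.List.pyGet?_neg_one, PySem.List.pyGet?_neg_one, hlast]
    have hlt : (m - 1).toNat <
        (((List.range ((m - 1).toNat)).map (fun k : Nat => (1 : Int) + (k : Int))).foldl
          (calcB_step depths d) [(1 : Int)]).length := by
      rw [hlen]
      omega
    rw [List.getLast?_eq_getElem?, hlen, Nat.add_sub_cancel, List.getElem?_eq_getElem hlt,
      List.getD_eq_getElem?_getD, List.getElem?_eq_getElem hlt]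
    simp
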